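-- pv_equiv track=rewrite | github.com/drizztSun/common_project | PythonLeetcode/leetcodeM/718_MaximumLengthOfRepeatedSubarray.py | doit_dp
-- ===== SOURCE A (Python) =====
-- def doit_dp(A: list, B: list) -> int:
--
--     m, n = len(A)+1, len(B)+1
--
--     dp = [[0 for _ in range(m)] for _ in range(n)]
--
--     res = 0
--
--     for i in range(1, n):
--
--         for j in range(1, m):
--
--             dp[i][j] = (dp[i-1][j-1] + 1) if A[j-1] != B[i-1] else 0
--
--             res = max(res, dp[i][j])
--
--     return res
-- ===== SOURCE B (Python) =====
-- def doit_dp(A: list, B: list) -> int: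
--     # Diagonal sweeps with a scalar running counter instead of an (m+1)x(n+1) DP table:
--     # O(1) extra space, same O(len(A)*len(B)) time.
--     def diag_best(pairs):
--         best = run = 0
--         for a, b in pairs:
--             run = run + 1 if a != b else 0
--             if run > best:
--                 best = run
--         return best
--
--     best = 0
--     for i0 in range(len(B)):
--         best = max(best, diag_best(zip(A, B[i0:])))
--     for j0 in range(1, len(A)):
--         best = max(best, diag_best(zip(A[j0:], B)))
--     return best
-- ===== Notes on version B (the rewrite author's own statement) =====
-- stated objective: alternative
-- what changed: Replaced the full (m+1)x(n+1) DP table with independent diagonal sweeps that keep a single scalar run counter and a global max: O(1) extra space instead of O(m*n), and no per-cell table writes.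
import Mathlib
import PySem

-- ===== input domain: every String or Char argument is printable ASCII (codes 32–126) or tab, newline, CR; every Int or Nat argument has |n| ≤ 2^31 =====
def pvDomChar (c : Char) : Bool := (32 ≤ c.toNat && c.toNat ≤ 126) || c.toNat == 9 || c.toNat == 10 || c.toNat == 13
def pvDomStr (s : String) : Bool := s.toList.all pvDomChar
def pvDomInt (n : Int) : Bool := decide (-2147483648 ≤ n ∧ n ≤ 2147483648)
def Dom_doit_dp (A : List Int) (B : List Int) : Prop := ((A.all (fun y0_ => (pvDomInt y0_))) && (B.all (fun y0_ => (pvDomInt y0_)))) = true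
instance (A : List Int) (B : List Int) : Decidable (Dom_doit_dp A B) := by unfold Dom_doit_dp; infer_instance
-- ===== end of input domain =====

-- B replaces the full (m+1)x(n+1) DP table of A with independent diagonal sweeps that keep one
-- scalar running counter (O(1) extra space, same quadratic time): objective 'alternative'.

-- ===== PORT A =====
def doit_dp (A : List Int) (B : List Int) : Int :=
  let m : Int := PySem.List.len A + 1
  let n : Int := PySem.List.len B + 1
  let dp : List (List Int) :=
    (PySem.List.pyRange 0 n 1).map (fun _ => (PySem.List.pyRange 0 m 1).map (fun _ => (0 : Int)))
  let st :=
    (PySem.List.pyRange 1 n 1).foldl (fun st i =>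
      (PySem.List.pyRange 1 m 1).foldl (fun st j =>
        let v : Int :=
          if PySem.List.pyGetD A (j - 1) 0 ≠ PySem.List.pyGetD B (i - 1) 0 then
            PySem.List.pyGetD (PySem.List.pyGetD st.1 (i - 1) ([] : List Int)) (j - 1) 0 + 1
          else 0
        -- dp[i][j] = v: i, j come from range(1, …) so they are ≥ 1 and in range; .toNat is exact here
        (st.1.set i.toNat ((PySem.List.pyGetD st.1 i ([] : List Int)).set j.toNat v), max st.2 v))
        st) (dp, (0 : Int))
  st.2

-- ===== PORT B =====
-- 'diag_best(pairs)' of Source B: one pass over the aligned pairs of a diagonal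
def runFold : List (Int × Int) → Int → Int → Int
  | [], _, best => best
  | (a, b) :: rest, run, best =>
    let run' := if a ≠ b then run + 1 else 0
    runFold rest run' (max best run')

def doit_dp_alt (A : List Int) (B : List Int) : Int :=
  let best1 := (List.range B.length).foldl
    (fun best i0 => max best (runFold (A.zip (B.drop i0)) 0 0)) 0
  (List.range' 1 (A.length - 1)).foldl
    (fun best j0 => max best (runFold ((A.drop j0).zip B) 0 0)) best1

-- ===== PRECONDITION & SPEC =====
def Spec_doit_dp (A : List Int) (B : List Int) (out : Int) : Prop := out = doit_dp_alt A B
instance (A : List Int) (B : List Int) (out : Int) : Decidable (Spec_doit_dp A B out) := by unfold Spec_doit_dp; infer_instance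

-- ===== CLAIM (what is proved, stated in full; the proofs are below) =====
def Claim_equal_doit_dp : Prop := ∀ (A : List Int) (B : List Int), Dom_doit_dp A B → Spec_doit_dp A B (doit_dp A B)

-- ===== LEMMAS AND PROOFS =====

-- the run value of the aligned-mismatch recurrence at 0-based cell (i, j): row index into B, column into A
def fRun (A B : List Int) : Nat → Nat → Int
  | 0, j => if A.getD j 0 ≠ B.getD 0 0 then 1 else 0
  | i + 1, 0 => if A.getD 0 0 ≠ B.getD (i + 1) 0 then 1 else 0
  | i + 1, j + 1 => if A.getD (j + 1) 0 ≠ B.getD (i + 1) 0 then fRun A B i j + 1 else 0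

-- max of a list of Ints, floored at 0
def M (l : List Int) : Int := l.foldl max 0

theorem foldl_max_shift (l : List Int) : ∀ a b : Int, l.foldl max (max a b) = max a (l.foldl max b) := by
  induction l with
  | nil => intro a b; rfl
  | cons x t ih =>
    intro a b
    simpa [List.foldl, max_assoc] using ih a (max b x)

theorem foldl_max_eq_max_M (l : List Int) (b : Int) (hb : 0 ≤ b) :
    l.foldl max b = max b (M l) := by
  have := foldl_max_shift l b 0
  simpa [M, max_eq_left hb] using this


theorem foldl_max_le_iff (l : List Int) : ∀ a b : Int, l.foldl max a ≤ b ↔ a ≤ b ∧ ∀ x ∈ l, x ≤ b := by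
  induction l with
  | nil => intro a b; simp
  | cons x t ih =>
    intro a b
    simp [List.foldl, ih]
    tauto

theorem M_nonneg (l : List Int) : 0 ≤ M l :=
  ((foldl_max_le_iff l 0 (M l)).mp le_rfl).1

theorem le_M_of_mem {l : List Int} {x : Int} (hx : x ∈ l) : x ≤ M l :=
  ((foldl_max_le_iff l 0 (M l)).mp le_rfl).2 x hx

theorem M_le_of_subset {l₁ l₂ : List Int} (h : ∀ x ∈ l₁, x ∈ l₂) : M l₁ ≤ M l₂ := by
  rw [M, foldl_max_le_iff]
  exact ⟨M_nonneg l₂, fun x hx => le_M_of_mem (h x hx)⟩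

theorem M_eq_of_mem_iff {l₁ l₂ : List Int} (h : ∀ x, x ∈ l₁ ↔ x ∈ l₂) : M l₁ = M l₂ :=
  le_antisymm (M_le_of_subset fun x hx => (h x).mp hx) (M_le_of_subset fun x hx => (h x).mpr hx)

-- ======== B side ========

def prevRun (A B : List Int) (i j : Nat) : Int :=
  if 1 ≤ i ∧ 1 ≤ j then fRun A B (i - 1) (j - 1) else 0

theorem step_eq_fRun (A B : List Int) (i j : Nat) (run : Int)
    (hi : i < B.length) (hj : j < A.length) (hrun : run = prevRun A B i j) :
    (if A[j] ≠ B[i] then run + 1 else 0) = fRun A B i j := by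
  subst hrun
  match i, j, hi, hj with
  | 0, j, hi, hj =>
    simp [prevRun, fRun, List.getElem?_eq_getElem hj, List.getElem?_eq_getElem hi]
  | i + 1, 0, hi, hj =>
    simp [prevRun, fRun, List.getElem?_eq_getElem hj, List.getElem?_eq_getElem hi]
  | i + 1, j + 1, hi, hj =>
    simp [prevRun, fRun, List.getElem?_eq_getElem hj, List.getElem?_eq_getElem hi]

theorem runFold_spec (A B : List Int) :
    ∀ fuel i j run best, fuel = A.length - j → run = prevRun A B i j →
      runFold ((A.drop j).zip (B.drop i)) run best
        = List.foldl max best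
            ((List.range (min (B.length - i) (A.length - j))).map (fun t => fRun A B (i + t) (j + t))) := by
  intro fuel
  induction fuel with
  | zero =>
    intro i j run best hfuel _
    have hj : A.length ≤ j := by omega
    have : A.drop j = [] := List.drop_eq_nil_of_le hj
    simp [this, runFold, Nat.sub_eq_zero_of_le hj]
  | succ fuel ih =>
    intro i j run best hfuel hrun
    have hj : j < A.length := by omega
    by_cases hi : i < B.length
    · have hdA : A.drop j = A[j] :: A.drop (j + 1) := List.drop_eq_getElem_cons hj
      have hdB : B.drop i = B[i] :: B.drop (i + 1) := List.drop_eq_getElem_cons hi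
      rw [hdA, hdB]
      show runFold _ _ _ = _
      rw [List.zip_cons_cons]
      show runFold ((A.drop (j+1)).zip (B.drop (i+1)))
            (if A[j] ≠ B[i] then run + 1 else 0)
            (max best (if A[j] ≠ B[i] then run + 1 else 0)) = _
      rw [step_eq_fRun A B i j run hi hj hrun]
      have hrun' : fRun A B i j = prevRun A B (i + 1) (j + 1) := by
        simp [prevRun]
      have hmin : min (B.length - i) (A.length - j)
          = min (B.length - (i + 1)) (A.length - (j + 1)) + 1 := by omega
      rw [ih (i + 1) (j + 1) (fRun A B i j) (max best (fRun A B i j)) (by omega) hrun',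
          hmin, List.range_succ_eq_map, List.map_cons, List.map_map, List.foldl_cons]
      congr 1
      refine List.map_congr_left fun t _ => ?_
      have h1 : i + (t + 1) = i + 1 + t := by omega
      have h2 : j + (t + 1) = j + 1 + t := by omega
      simp [Function.comp, h1, h2]
    · have : B.drop i = [] := List.drop_eq_nil_of_le (by omega)
      simp [this, runFold, Nat.sub_eq_zero_of_le (le_of_not_gt hi)]

-- all diagonal values produced by B
def bigB (A B : List Int) : List Int :=
  (List.range B.length).flatMap
      (fun i0 => (List.range (min (B.length - i0) A.length)).map (fun t => fRun A B (i0 + t) t))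
    ++ (List.range' 1 (A.length - 1)).flatMap
      (fun j0 => (List.range (min B.length (A.length - j0))).map (fun t => fRun A B t (j0 + t)))

theorem foldl_max_M_flatMap {α : Type} (g : α → List Int) :
    ∀ (l : List α) (b : Int), 0 ≤ b →
      l.foldl (fun best x => max best (M (g x))) b = List.foldl max b (l.flatMap g) := by
  intro l
  induction l with
  | nil => intro b hb; simp
  | cons x t ih =>
    intro b hb
    rw [List.foldl_cons, List.flatMap_cons, List.foldl_append,
        foldl_max_eq_max_M (g x) b hb]
    exact ih _ (le_trans hb (le_max_left _ _))

theorem alt_eq_M_bigB (A B : List Int) : doit_dp_alt A B = M (bigB A B) := by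
  show (List.range' 1 (A.length - 1)).foldl
      (fun best j0 => max best (runFold ((A.drop j0).zip B) 0 0))
      ((List.range B.length).foldl
        (fun best i0 => max best (runFold (A.zip (B.drop i0)) 0 0)) 0) = _
  have h1 : (fun (best : Int) (i0 : Nat) => max best (runFold (A.zip (B.drop i0)) 0 0))
      = fun best i0 => max best (M ((List.range (min (B.length - i0) A.length)).map
          (fun t => fRun A B (i0 + t) t))) := by
    funext best i0
    have h := runFold_spec A B A.length i0 0 0 0 (by omega) (by simp [prevRun])
    simp only [List.drop_zero] at h
    simp [h, M]
  have h2 : (fun (best : Int) (j0 : Nat) => max best (runFold ((A.drop j0).zip B) 0 0))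
      = fun best j0 => max best (M ((List.range (min B.length (A.length - j0))).map
          (fun t => fRun A B t (j0 + t)))) := by
    funext best j0
    have h := runFold_spec A B (A.length - j0) 0 j0 0 0 (by omega) (by simp [prevRun])
    simp only [List.drop_zero] at h
    simp [h, M]
  rw [h1, h2, foldl_max_M_flatMap _ (List.range B.length) 0 le_rfl]
  rw [show (List.foldl max 0
      (List.flatMap (fun i0 => List.map (fun t => fRun A B (i0 + t) t)
        (List.range (min (B.length - i0) A.length))) (List.range B.length))) = M _ from rfl]
  rw [foldl_max_M_flatMap _ (List.range' 1 (A.length - 1)) _ (M_nonneg _), M, ← List.foldl_append]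
  rfl

-- ======== A side ========

-- row-major values of the whole grid
def gridVals (A B : List Int) (k : Nat) : List Int :=
  (List.range k).flatMap (fun r => (List.range A.length).map (fun c => fRun A B r c))

def look (dp : List (List Int)) (r c : Nat) : Int := (dp.getD r []).getD c 0

def sim (A B : List Int) (dp : List (List Int)) (h : Nat → Nat → Int) : Prop :=
  dp.length = B.length + 1 ∧ (∀ r, r < B.length + 1 → (dp.getD r []).length = A.length + 1)
    ∧ ∀ r c, look dp r c = h r c

-- dp-table contents after rows 1..i-1 are done and row i is done up to column c (1-based)
def hPar (A B : List Int) (i c r c' : Nat) : Int :=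
  if 1 ≤ r ∧ 1 ≤ c' ∧ c' ≤ A.length ∧ (r < i ∨ (r = i ∧ c' ≤ c)) then fRun A B (r - 1) (c' - 1)
  else 0

theorem sim_congr {A B : List Int} {dp : List (List Int)} {h h' : Nat → Nat → Int}
    (hs : sim A B dp h) (hh : ∀ r c, h r c = h' r c) : sim A B dp h' :=
  ⟨hs.1, hs.2.1, fun r c => (hs.2.2 r c).trans (hh r c)⟩

theorem getD_set {α : Type} (l : List α) (i j : Nat) (v d : α) (h : i < l.length) :
    (l.set i v).getD j d = if j = i then v else l.getD j d := by
  by_cases hj : j = i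
  · subst hj; simp [List.getD_eq_getElem?_getD, List.getElem?_set_self h]
  · simp [List.getD_eq_getElem?_getD, List.getElem?_set_ne (Ne.symm hj), hj]

theorem look_set (dp : List (List Int)) (i c : Nat) (v : Int) (hdi : i < dp.length)
    (hci : c < (dp.getD i []).length) (r c' : Nat) :
    look (dp.set i ((dp.getD i []).set c v)) r c'
      = if r = i ∧ c' = c then v else look dp r c' := by
  unfold look
  rw [getD_set dp i r _ [] hdi]
  by_cases hr : r = i
  · subst hr
    rw [if_pos rfl, getD_set _ c c' v 0 hci]
    by_cases hc' : c' = c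
    · simp [hc']
    · simp [hc']
  · simp [hr]

theorem v_eq_fRun (A B : List Int) (i c : Nat) (hi1 : 1 ≤ i) (hi2 : i ≤ B.length)
    (hc : c < A.length) :
    (if A.getD c 0 ≠ B.getD (i - 1) 0 then hPar A B i c (i - 1) c + 1 else 0)
      = fRun A B (i - 1) c := by
  match i, hi1 with
  | s + 1, _ =>
    simp only [Nat.add_sub_cancel]
    match s, c with
    | 0, c =>
      rw [show hPar A B (0 + 1) c 0 c = 0 by unfold hPar; split_ifs <;> omega]
      simp [fRun]
    | u + 1, 0 =>
      rw [show hPar A B (u + 1 + 1) 0 (u + 1) 0 = 0 by unfold hPar; split_ifs <;> omega]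
      simp [fRun]
    | u + 1, t + 1 =>
      rw [show hPar A B (u + 1 + 1) (t + 1) (u + 1) (t + 1) = fRun A B u t by
        unfold hPar
        rw [if_pos ⟨by omega, by omega, by omega, Or.inl (by omega)⟩]
        simp]
      simp [fRun]

theorem sim_set (A B : List Int) (dp : List (List Int)) (i c : Nat)
    (hs : sim A B dp (hPar A B i c)) (hi1 : 1 ≤ i) (hi2 : i ≤ B.length) (hc : c < A.length) :
    sim A B (dp.set i ((dp.getD i []).set (c + 1) (fRun A B (i - 1) c)))
      (hPar A B i (c + 1)) := by
  obtain ⟨hlen, hrow, hlook⟩ := hs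
  have hdi : i < dp.length := by omega
  have hci : c + 1 < (dp.getD i []).length := by rw [hrow i (by omega)]; omega
  refine ⟨by simp [hlen], ?_, ?_⟩
  · intro r hr
    rw [getD_set dp i r _ [] hdi]
    by_cases hri : r = i
    · rw [if_pos hri, List.length_set]
      exact hrow i (by omega)
    · rw [if_neg hri]
      exact hrow r hr
  · intro r c'
    rw [look_set dp i (c + 1) _ hdi hci r c']
    by_cases h : r = i ∧ c' = c + 1
    · obtain ⟨h1, h2⟩ := h
      subst h1; subst h2
      rw [if_pos ⟨rfl, rfl⟩]
      unfold hPar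
      rw [if_pos ⟨by omega, by omega, by omega, Or.inr ⟨rfl, le_rfl⟩⟩]
      simp
    · rw [if_neg h, hlook r c']
      unfold hPar
      split_ifs <;> first | rfl | omega

theorem inner_spec (A B : List Int) (i : Nat) (hi1 : 1 ≤ i) (hi2 : i ≤ B.length) :
    ∀ (c : Nat), c ≤ A.length → ∀ (dp : List (List Int)) (res : Int),
      sim A B dp (hPar A B i 0) →
      ∃ dp',
        (PySem.List.pyRange 1 ((c : Int) + 1) 1).foldl
          (fun (st : List (List Int) × Int) (j : Int) =>
            let v : Int :=
              if PySem.List.pyGetD A (j - 1) 0 ≠ PySem.List.pyGetD B ((i : Int) - 1) 0 then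
                PySem.List.pyGetD (PySem.List.pyGetD st.1 ((i : Int) - 1) ([] : List Int)) (j - 1) 0 + 1
              else 0
            (st.1.set (i : Int).toNat ((PySem.List.pyGetD st.1 (i : Int) ([] : List Int)).set j.toNat v),
              max st.2 v)) (dp, res)
          = (dp', List.foldl max res ((List.range c).map (fun t => fRun A B (i - 1) t)))
          ∧ sim A B dp' (hPar A B i c) := by
  intro c
  induction c with
  | zero =>
    intro _ dp res hs
    refine ⟨dp, ?_, hs⟩
    rw [show (((0 : Nat) : Int) + 1) = 1 by norm_num, PySem.List.pyRange_one_eq_nil le_rfl]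
    simp
  | succ c ih =>
    intro hc dp res hs
    obtain ⟨dp', heq, hsim'⟩ := ih (by omega) dp res hs
    have hsplit : PySem.List.pyRange 1 (((c + 1 : Nat) : Int) + 1) 1
        = PySem.List.pyRange 1 ((c : Int) + 1) 1 ++ [((c : Int) + 1)] := by
      rw [show (((c + 1 : Nat) : Int) + 1) = ((c : Int) + 1) + 1 by push_cast; ring]
      exact PySem.List.pyRange_one_succ_right (by omega)
    rw [hsplit, List.foldl_append, heq, List.foldl_cons, List.foldl_nil]
    have ec : ((c : Int) + 1 - 1) = ((c : Nat) : Int) := by ring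
    have ei : ((i : Int) - 1) = ((i - 1 : Nat) : Int) := by omega
    have etn : ((c : Int) + 1).toNat = c + 1 := by omega
    have hv : (if PySem.List.pyGetD A ((c : Int) + 1 - 1) 0 ≠ PySem.List.pyGetD B ((i : Int) - 1) 0 then
          PySem.List.pyGetD (PySem.List.pyGetD dp' ((i : Int) - 1) ([] : List Int)) ((c : Int) + 1 - 1) 0 + 1
        else 0) = fRun A B (i - 1) c := by
      rw [ec, ei, PySem.List.pyGetD_natCast, PySem.List.pyGetD_natCast, PySem.List.pyGetD_natCast,
        PySem.List.pyGetD_natCast]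
      have hl : (dp'.getD (i - 1) []).getD c 0 = hPar A B i c (i - 1) c := hsim'.2.2 (i - 1) c
      rw [show ((List.getD dp' (i-1) []).getD c 0 : Int) = hPar A B i c (i - 1) c from hl]
      exact v_eq_fRun A B i c hi1 hi2 (by omega)
    simp only [hv, Int.toNat_natCast, etn, PySem.List.pyGetD_natCast]
    refine ⟨dp'.set i ((dp'.getD i []).set (c + 1) (fRun A B (i - 1) c)), ?_,
      sim_set A B dp' i c hsim' hi1 hi2 (by omega)⟩
    rw [Prod.mk.injEq]
    refine ⟨rfl, ?_⟩
    rw [List.range_succ, List.map_append, List.foldl_append]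
    rfl

theorem grid_succ (A B : List Int) (k : Nat) :
    gridVals A B (k + 1) = gridVals A B k ++ (List.range A.length).map (fun c => fRun A B k c) := by
  simp [gridVals, List.range_succ]

theorem outer_spec (A B : List Int) :
    ∀ (k : Nat), k ≤ B.length → ∀ (dp0 : List (List Int)), sim A B dp0 (fun _ _ => 0) →
      ∃ dp',
        (PySem.List.pyRange 1 ((k : Int) + 1) 1).foldl
          (fun (st : List (List Int) × Int) (i : Int) =>
            (PySem.List.pyRange 1 ((A.length : Int) + 1) 1).foldl
              (fun (st : List (List Int) × Int) (j : Int) =>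
                let v : Int :=
                  if PySem.List.pyGetD A (j - 1) 0 ≠ PySem.List.pyGetD B (i - 1) 0 then
                    PySem.List.pyGetD (PySem.List.pyGetD st.1 (i - 1) ([] : List Int)) (j - 1) 0 + 1
                  else 0
                (st.1.set i.toNat ((PySem.List.pyGetD st.1 i ([] : List Int)).set j.toNat v),
                  max st.2 v)) st) (dp0, (0 : Int))
          = (dp', M (gridVals A B k)) ∧ sim A B dp' (hPar A B (k + 1) 0) := by
  intro k
  induction k with
  | zero =>
    intro _ dp0 hs0
    refine ⟨dp0, ?_, ?_⟩
    · rw [show (((0 : Nat) : Int) + 1) = 1 by norm_num, PySem.List.pyRange_one_eq_nil le_rfl]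
      simp [gridVals, M]
    · exact sim_congr hs0 (by intro r c; unfold hPar; split_ifs <;> omega)
  | succ k ih =>
    intro hk dp0 hs0
    obtain ⟨dpk, heq, hsimk⟩ := ih (by omega) dp0 hs0
    have hsplit : PySem.List.pyRange 1 (((k + 1 : Nat) : Int) + 1) 1
        = PySem.List.pyRange 1 ((k : Int) + 1) 1 ++ [((k : Int) + 1)] := by
      rw [show (((k + 1 : Nat) : Int) + 1) = ((k : Int) + 1) + 1 by push_cast; ring]
      exact PySem.List.pyRange_one_succ_right (by omega)
    rw [hsplit, List.foldl_append, heq, List.foldl_cons, List.foldl_nil]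
    rw [show ((k : Int) + 1) = ((k + 1 : Nat) : Int) by push_cast; ring]
    obtain ⟨dp', heq', hsim'⟩ :=
      inner_spec A B (k + 1) (by omega) (by omega) A.length le_rfl dpk (M (gridVals A B k)) hsimk
    refine ⟨dp', ?_, ?_⟩
    · rw [heq']
      rw [grid_succ, M, M, List.foldl_append]
      simp
    · exact sim_congr hsim' (by intro r c; unfold hPar; split_ifs <;> omega)

theorem sim_dp0 (A B : List Int) :
    sim A B ((PySem.List.pyRange 0 ((B.length : Int) + 1) 1).map
        (fun _ => (PySem.List.pyRange 0 ((A.length : Int) + 1) 1).map (fun _ => (0 : Int))))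
      (fun _ _ => 0) := by
  rw [List.map_const', List.map_const']
  have hB : (PySem.List.pyRange 0 ((B.length : Int) + 1) 1).length = B.length + 1 := by
    rw [PySem.List.length_pyRange_one]; omega
  have hA : (PySem.List.pyRange 0 ((A.length : Int) + 1) 1).length = A.length + 1 := by
    rw [PySem.List.length_pyRange_one]; omega
  rw [hA, hB]
  refine ⟨by simp, ?_, ?_⟩
  · intro r hr
    simp [List.getD_eq_getElem?_getD, hr]
  · intro r c
    unfold look
    by_cases hr : r < B.length + 1
    · by_cases hcb : c < A.length + 1 <;>
        simp [List.getD_eq_getElem?_getD, hr, hcb]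
    · simp [List.getD_eq_getElem?_getD, hr]

theorem a_eq_M_grid (A B : List Int) : doit_dp A B = M (gridVals A B B.length) := by
  show ((PySem.List.pyRange 1 (PySem.List.len B + 1) 1).foldl _
      ((PySem.List.pyRange 0 (PySem.List.len B + 1) 1).map _, (0 : Int))).2 = _
  simp only [PySem.List.len_eq]
  obtain ⟨dp', heq, _⟩ :=
    outer_spec A B B.length le_rfl _ (sim_dp0 A B)
  rw [heq]

-- ======== membership ========

theorem mem_grid_iff (A B : List Int) (x : Int) :
    x ∈ gridVals A B B.length ↔ ∃ r, ∃ c, r < B.length ∧ c < A.length ∧ x = fRun A B r c := by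
  simp [gridVals, List.mem_flatMap, List.mem_map, List.mem_range]
  aesop

theorem mem_bigB_iff (A B : List Int) (x : Int) :
    x ∈ bigB A B ↔ ∃ r, ∃ c, r < B.length ∧ c < A.length ∧ x = fRun A B r c := by
  simp only [bigB, List.mem_append, List.mem_flatMap, List.mem_map, List.mem_range,
    List.mem_range'_1]
  constructor
  · rintro (⟨i0, hi0, t, ht, hx⟩ | ⟨j0, hj0, t, ht, hx⟩)
    · exact ⟨i0 + t, t, by omega, by omega, hx.symm⟩
    · exact ⟨t, j0 + t, by omega, by omega, hx.symm⟩
  · rintro ⟨r, c, hr, hc, hx⟩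
    by_cases h : c ≤ r
    · left
      refine ⟨r - c, by omega, c, by omega, ?_⟩
      have hrc : r - c + c = r := by omega
      rw [hrc, hx]
    · right
      refine ⟨c - r, ⟨by omega, by omega⟩, r, by omega, ?_⟩
      have hcr : c - r + r = c := by omega
      rw [hcr, hx]

-- ===== VERDICT (by name: the statement is the Claim_ definition above) =====
theorem doit_dp_spec : Claim_equal_doit_dp := by
  intro A B _
  unfold Spec_doit_dp
  rw [a_eq_M_grid, alt_eq_M_bigB]
  exact M_eq_of_mem_iff fun x => (mem_grid_iff A B x).trans (mem_bigB_iff A B x).symm
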